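-- pv_equiv track=rewrite | github.com/Wild-Magic-Sorcerer/python-homework-storage-2025 | Сиразетдинов Марат Рустамович/LAB02/task02.py | analyze_string
-- ===== SOURCE A (Python) =====
-- def analyze_string(text):
--     text = text.strip()
--
--     if not text:
--
--         return {'words': 0, 'letters': 0, 'digits': 0, 'spaces': 0, 'punctuation': 0}
--
--     words = len(text.split())
--
--     letters = digits = spaces = punctuation = 0
--
--     for char in text:
--         if char.isalpha():
--             letters += 1
--         elif char.isdigit():
--             digits += 1
--         elif char.isspace():
--             spaces += 1
--         else:
--             punctuation += 1
--
--     return {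
--         'words': words,
--         'letters': letters,
--         'digits': digits,
--         'spaces': spaces,
--         'punctuation': punctuation
--     }
-- ===== SOURCE B (Python) =====
-- def analyze_string(text):
--     text = text.strip()
--     if not text:
--         return {'words': 0, 'letters': 0, 'digits': 0, 'spaces': 0, 'punctuation': 0}
--     words = len(text.split())
--     letters = sum(1 for c in text if c.isalpha())
--     digits = sum(1 for c in text if c.isdigit())
--     spaces = sum(1 for c in text if c.isspace())
--     return {
--         'words': words,
--         'letters': letters,
--         'digits': digits,
--         'spaces': spaces,
--         'punctuation': len(text) - letters - digits - spaces
--     }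
-- ===== Notes on version B (the rewrite author's own statement) =====
-- stated objective: alternative
-- what changed: Replaces the single four-counter if/elif loop by three independent counting passes (letters, digits, spaces) and derives punctuation as the closed-form complement len(text) - letters - digits - spaces, relying on the mutual exclusivity of the three predicates.
import Mathlib
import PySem

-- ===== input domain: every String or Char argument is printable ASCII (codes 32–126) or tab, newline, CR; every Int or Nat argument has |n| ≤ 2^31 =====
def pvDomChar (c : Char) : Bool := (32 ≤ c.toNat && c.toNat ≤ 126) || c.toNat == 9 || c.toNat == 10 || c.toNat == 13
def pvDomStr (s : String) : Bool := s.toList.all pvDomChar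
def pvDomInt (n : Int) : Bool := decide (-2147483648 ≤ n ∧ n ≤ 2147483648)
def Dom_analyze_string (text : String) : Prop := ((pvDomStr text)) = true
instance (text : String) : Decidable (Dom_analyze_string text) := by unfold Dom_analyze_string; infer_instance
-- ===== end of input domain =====

-- B replaces A's single four-counter if/elif loop by three independent counting
-- passes and derives punctuation as the complement len - letters - digits - spaces.

-- ===== PORT A =====
def analyze_string (text : String) : List (String × Int) :=
  let text := PySem.Str.strip text
  if text = "" then
    [("words", 0), ("letters", 0), ("digits", 0), ("spaces", 0), ("punctuation", 0)]
  else
    let words : Int := (PySem.Str.split₀ text).length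
    let acc := text.toList.foldl
      (fun (acc : Int × Int × Int × Int) c =>
        if PySem.Chars.isalpha c then (acc.1 + 1, acc.2.1, acc.2.2.1, acc.2.2.2)
        else if PySem.Chars.isdigit c then (acc.1, acc.2.1 + 1, acc.2.2.1, acc.2.2.2)
        else if PySem.Chars.isspace c then (acc.1, acc.2.1, acc.2.2.1 + 1, acc.2.2.2)
        else (acc.1, acc.2.1, acc.2.2.1, acc.2.2.2 + 1))
      (0, 0, 0, 0)
    [("words", words), ("letters", acc.1), ("digits", acc.2.1),
     ("spaces", acc.2.2.1), ("punctuation", acc.2.2.2)]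

-- ===== PORT B =====
def analyze_string_alt (text : String) : List (String × Int) :=
  let t := PySem.Str.strip text
  if t = "" then
    [("words", 0), ("letters", 0), ("digits", 0), ("spaces", 0), ("punctuation", 0)]
  else
    let cs := t.toList
    let words : Int := (PySem.Str.split₀ t).length
    let letters : Int := cs.countP PySem.Chars.isalpha
    let digits : Int := cs.countP PySem.Chars.isdigit
    let spaces : Int := cs.countP PySem.Chars.isspace
    [("words", words), ("letters", letters), ("digits", digits), ("spaces", spaces),
     ("punctuation", (cs.length : Int) - letters - digits - spaces)]

-- ===== PRECONDITION & SPEC =====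
def Spec_analyze_string (text : String) (out : List (String × Int)) : Prop := out = analyze_string_alt text
instance (text : String) (out : List (String × Int)) : Decidable (Spec_analyze_string text out) := by unfold Spec_analyze_string; infer_instance

-- ===== CLAIM (what is proved, stated in full; the proofs are below) =====
def Claim_equal_analyze_string : Prop := ∀ (text : String), Dom_analyze_string text → Spec_analyze_string text (analyze_string text)

-- ===== LEMMAS AND PROOFS =====

-- the three Python predicates are pairwise exclusive (true for every Char under PySem's definitions)
theorem pv_alpha_not_digit (c : Char) (h : PySem.Chars.isalpha c = true) :
    PySem.Chars.isdigit c = false := by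
  simp only [PySem.Chars.isalpha, PySem.Chars.isupper, PySem.Chars.islower,
    PySem.Chars.isdigit, Bool.or_eq_true, Bool.and_eq_true, decide_eq_true_eq,
    Bool.and_eq_false_iff, decide_eq_false_iff_not, Char.le_def, UInt32.le_iff_toNat_le,
    show ('A'.val.toNat) = 65 from rfl, show ('Z'.val.toNat) = 90 from rfl,
    show ('a'.val.toNat) = 97 from rfl, show ('z'.val.toNat) = 122 from rfl,
    show ('0'.val.toNat) = 48 from rfl, show ('9'.val.toNat) = 57 from rfl] at *
  omega

theorem pv_alpha_not_space (c : Char) (h : PySem.Chars.isalpha c = true) :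
    PySem.Chars.isspace c = false := by
  simp only [PySem.Chars.isalpha, PySem.Chars.isupper, PySem.Chars.islower,
    PySem.Chars.isspace, Char.toNat, Bool.or_eq_true, Bool.and_eq_true, decide_eq_true_eq,
    Bool.or_eq_false_iff, Bool.and_eq_false_iff, decide_eq_false_iff_not,
    Char.le_def, UInt32.le_iff_toNat_le,
    show ('A'.val.toNat) = 65 from rfl, show ('Z'.val.toNat) = 90 from rfl,
    show ('a'.val.toNat) = 97 from rfl, show ('z'.val.toNat) = 122 from rfl] at *
  omega

theorem pv_digit_not_space (c : Char) (h : PySem.Chars.isdigit c = true) :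
    PySem.Chars.isspace c = false := by
  simp only [PySem.Chars.isdigit, PySem.Chars.isspace, Char.toNat,
    Bool.and_eq_true, decide_eq_true_eq,
    Bool.or_eq_false_iff, Bool.and_eq_false_iff, decide_eq_false_iff_not,
    Char.le_def, UInt32.le_iff_toNat_le,
    show ('0'.val.toNat) = 48 from rfl, show ('9'.val.toNat) = 57 from rfl] at *
  omega

-- invariant of A's four-counter fold: each counter advances by the corresponding count,
-- the final (else) counter by the complement
theorem pv_fold_counts (cs : List Char) (l d s p : Int) :
    cs.foldl
      (fun (acc : Int × Int × Int × Int) c =>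
        if PySem.Chars.isalpha c then (acc.1 + 1, acc.2.1, acc.2.2.1, acc.2.2.2)
        else if PySem.Chars.isdigit c then (acc.1, acc.2.1 + 1, acc.2.2.1, acc.2.2.2)
        else if PySem.Chars.isspace c then (acc.1, acc.2.1, acc.2.2.1 + 1, acc.2.2.2)
        else (acc.1, acc.2.1, acc.2.2.1, acc.2.2.2 + 1))
      (l, d, s, p) =
    (l + cs.countP PySem.Chars.isalpha,
     d + cs.countP PySem.Chars.isdigit,
     s + cs.countP PySem.Chars.isspace,
     p + ((cs.length : Int) - cs.countP PySem.Chars.isalpha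
          - cs.countP PySem.Chars.isdigit - cs.countP PySem.Chars.isspace)) := by
  induction cs generalizing l d s p with
  | nil => simp
  | cons c cs ih =>
    simp only [List.foldl_cons, List.countP_cons, List.length_cons]
    by_cases ha : PySem.Chars.isalpha c = true
    · simp only [ha, pv_alpha_not_digit c ha, pv_alpha_not_space c ha, ih, if_true, if_false,
        Bool.false_eq_true, Prod.mk.injEq]
      refine ⟨by push_cast; ring, by push_cast; ring, by push_cast; ring, by push_cast; ring⟩
    · by_cases hd : PySem.Chars.isdigit c = true
      · simp only [ha, hd, pv_digit_not_space c hd, ih, if_true, if_false,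
          Bool.false_eq_true, Prod.mk.injEq]
        refine ⟨by push_cast; ring, by push_cast; ring, by push_cast; ring, by push_cast; ring⟩
      · by_cases hs : PySem.Chars.isspace c = true
        · simp only [ha, hd, hs, ih, if_true, Bool.false_eq_true, Prod.mk.injEq]
          refine ⟨by push_cast; ring, by push_cast; ring, by push_cast; ring, by push_cast; ring⟩
        · simp only [ha, hd, hs, ih, Bool.false_eq_true, Prod.mk.injEq]
          refine ⟨by push_cast; ring, by push_cast; ring, by push_cast; ring, by push_cast; ring⟩

-- ===== VERDICT (by name: the statement is the Claim_ definition above) =====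
theorem analyze_string_spec : Claim_equal_analyze_string := by
  intro text _
  unfold Spec_analyze_string analyze_string analyze_string_alt
  by_cases h : PySem.Str.strip text = ""
  · simp [h]
  · simp only [if_neg h]
    rw [pv_fold_counts]
    simp only [zero_add]
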